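-- pv_equiv track=rewrite | github.com/Shwei1/asano | graph_algorithms.py | max_matching_convex
-- ===== SOURCE A (Python) =====
-- import heapq
--
-- def max_matching_convex(adj_H: list[list[int]], V: int):
--     """
--     Максимальне пароспівставлення в конвексному дводольному графі.
--
--     Ліва доля: H = {0, ..., H-1}.
--     Права доля: V = {0, ..., V-1}.
--
--     Припущення: для кожного h сусіди adj_H[h] утворюють інтервал
--     по індексах вертикалей (після сортування).
--
--     Алгоритм:
--       1. Для кожного h обчислюємо інтервал [L_h, R_h].
--       2. Розглядаємо вертикалі v = 0..V-1 як "time slots".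
--       3. Для кожного v запускаємо greedy-алгоритм інтервального
--          розкладу (unit jobs with release & deadline) з пріоритетом
--          за мінімальним R_h.
--
--     Час: O((H + V) log H) для самого matching; побудова adj_H
--     через sweep займає O(E log H), де E – число перетинів.
--     """
--     H = len(adj_H)
--
--     intervals = []
--     for h_id, nbrs in enumerate(adj_H):
--         if not nbrs:
--             continue
--         uniq = sorted(set(nbrs))
--         L = uniq[0]
--         R = uniq[-1]
--         intervals.append({"h_id": h_id, "L": L, "R": R})
--
--     intervals.sort(key=lambda it: it["L"])
--
--     mate_H = [-1] * H
--     mate_V = [-1] * V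
--
--     pq: list[tuple[int, int]] = []
--     p = 0
--
--     for v_id in range(V):
--         while p < len(intervals) and intervals[p]["L"] <= v_id:
--             it = intervals[p]
--             if it["R"] >= v_id:
--                 heapq.heappush(pq, (it["R"], it["h_id"]))
--             p += 1
--
--         while pq and pq[0][0] < v_id:
--             heapq.heappop(pq)
--
--         if pq:
--             R_best, h_id = heapq.heappop(pq)
--             if mate_H[h_id] == -1 and mate_V[v_id] == -1:
--                 mate_H[h_id] = v_id
--                 mate_V[v_id] = h_id
--
--     return mate_H, mate_V
-- ===== SOURCE B (Python) =====
-- def max_matching_convex(adj_H: list[list[int]], V: int):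
--     # Same matching as the heap version, computed by a plain per-slot min-scan:
--     # for each vertical v pick the unmatched interval containing v with minimal (R, h_id).
--     intervals = []
--     for h_id, nbrs in enumerate(adj_H):
--         if nbrs:
--             intervals.append((h_id, min(nbrs), max(nbrs)))
--
--     mate_H = [-1] * len(adj_H)
--     mate_V = [-1] * V
--
--     for v in range(V):
--         best = None  # (R, h_id)
--         for h_id, L, R in intervals:
--             if mate_H[h_id] == -1 and L <= v <= R:
--                 if best is None or (R, h_id) < best:
--                     best = (R, h_id)
--         if best is not None:
--             mate_H[best[1]] = v
--             mate_V[v] = best[1]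
--
--     return mate_H, mate_V
-- ===== Notes on version B (the rewrite author's own statement) =====
-- stated objective: simpler
-- what changed: Replaced the heap-based sweep (intervals sorted by L, pointer p, lazy min-heap keyed on (R, h_id) with stale-entry purging) by a direct greedy: for each vertical slot v scan all intervals once and pick the unmatched interval with L <= v <= R minimizing (R, h_id); interval endpoints come from min/max instead of sorted(set(...)).
import Mathlib
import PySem

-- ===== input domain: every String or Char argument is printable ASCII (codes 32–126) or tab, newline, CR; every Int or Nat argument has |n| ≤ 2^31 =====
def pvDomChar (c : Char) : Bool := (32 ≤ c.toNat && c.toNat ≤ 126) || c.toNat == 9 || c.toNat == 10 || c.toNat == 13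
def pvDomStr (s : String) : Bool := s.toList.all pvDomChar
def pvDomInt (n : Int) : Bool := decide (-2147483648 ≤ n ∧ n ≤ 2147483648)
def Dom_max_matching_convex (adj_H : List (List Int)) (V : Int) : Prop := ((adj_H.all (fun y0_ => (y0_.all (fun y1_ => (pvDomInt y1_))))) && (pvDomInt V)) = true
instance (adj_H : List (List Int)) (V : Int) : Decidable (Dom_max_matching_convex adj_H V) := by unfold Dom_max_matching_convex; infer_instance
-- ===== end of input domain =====

-- B replaces A's sorted-interval pointer + min-heap event loop by a plain per-slot linear
-- min-scan over the unmatched intervals (same matching, simpler code, O(V*H) instead of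
-- O((H+V) log H)); equivalence of the returned pair is proved for all inputs.


-- ===== PORT A =====
-- heapq on (R, h) pairs is modeled as a list kept in ascending lexicographic order:
-- heappush = ordered insertion (PySem.List.insertBy), pq[0] = head, heappop = tail;
-- observably identical to heapq (peek/pop yield the lexicographic minimum).
def pvLexLt (a b : Int × Int) : Bool := decide (a.1 < b.1) || (a.1 == b.1 && decide (a.2 < b.2))

def pvIntervalsA (adj_H : List (List Int)) : List (Int × Int × Int) :=
  (PySem.List.enumerate adj_H 0).foldl (fun acc p =>
    if p.2 = [] then acc
    else
      let uniq := PySem.List.sorted (PySem.Set.ofList p.2) (fun x => x)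
      -- uniq[0] and uniq[-1]; always in range since p.2 ≠ []
      acc ++ [(p.1, PySem.List.pyGetD uniq 0 0, PySem.List.pyGetD uniq (-1) 0)]) []

-- while p < len(intervals) and intervals[p]["L"] <= v_id: push (R, h) if R >= v_id
def pvPushLoop (v : Int) : List (Int × Int × Int) → List (Int × Int) → List (Int × Int × Int) × List (Int × Int)
  | [], pq => ([], pq)
  | t :: rest, pq =>
      if t.2.1 ≤ v then
        pvPushLoop v rest (if t.2.2 ≥ v then PySem.List.insertBy pvLexLt (t.2.2, t.1) pq else pq)
      else (t :: rest, pq)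

-- while pq and pq[0][0] < v_id: heappop
def pvPurge (v : Int) : List (Int × Int) → List (Int × Int)
  | [] => []
  | k :: rest => if k.1 < v then pvPurge v rest else k :: rest

def pvStepA (st : List (Int × Int × Int) × List (Int × Int) × List Int × List Int) (v : Int) :
    List (Int × Int × Int) × List (Int × Int) × List Int × List Int :=
  let rem₁ := (pvPushLoop v st.1 st.2.1).1
  let pq₂ := pvPurge v (pvPushLoop v st.1 st.2.1).2
  match pq₂ with
  | [] => (rem₁, [], st.2.2.1, st.2.2.2)
  | k :: rest =>
      -- mate_H[h_id] / mate_V[v_id]: indices always in range, so pyGetD/pySetD are exact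
      if PySem.List.pyGetD st.2.2.1 k.2 0 == -1 && PySem.List.pyGetD st.2.2.2 v 0 == -1 then
        (rem₁, rest, PySem.List.pySetD st.2.2.1 k.2 v, PySem.List.pySetD st.2.2.2 v k.2)
      else (rem₁, rest, st.2.2.1, st.2.2.2)

def max_matching_convex (adj_H : List (List Int)) (V : Int) : List Int × List Int :=
  let intervals := PySem.List.sorted (pvIntervalsA adj_H) (fun t => t.2.1)
  let st := (PySem.List.pyRange 0 V 1).foldl pvStepA
      (intervals, [], List.replicate adj_H.length (-1), List.replicate V.toNat (-1))
  (st.2.2.1, st.2.2.2)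

-- ===== PORT B =====
def pvTupLt (a b : Int × Int) : Bool := decide (a.1 < b.1) || (a.1 == b.1 && decide (a.2 < b.2))

def pvIntervalsB (adj_H : List (List Int)) : List (Int × Int × Int) :=
  (PySem.List.enumerate adj_H 0).foldl (fun acc p =>
    if p.2 = [] then acc
    else acc ++ [(p.1, (PySem.List.min? p.2 (fun x => x)).getD 0,
                       (PySem.List.max? p.2 (fun x => x)).getD 0)]) []

def pvBest (intervals : List (Int × Int × Int)) (mH : List Int) (v : Int) : Option (Int × Int) :=
  intervals.foldl (fun best t =>
    if PySem.List.pyGetD mH t.1 0 == -1 && decide (t.2.1 ≤ v) && decide (v ≤ t.2.2) then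
      match best with
      | none => some (t.2.2, t.1)
      | some b => if pvTupLt (t.2.2, t.1) b then some (t.2.2, t.1) else some b
    else best) none

def pvStepB (intervals : List (Int × Int × Int)) (st : List Int × List Int) (v : Int) :
    List Int × List Int :=
  match pvBest intervals st.1 v with
  | none => st
  | some b => (PySem.List.pySetD st.1 b.2 v, PySem.List.pySetD st.2 v b.2)

def max_matching_convex_alt (adj_H : List (List Int)) (V : Int) : List Int × List Int :=
  (PySem.List.pyRange 0 V 1).foldl (pvStepB (pvIntervalsB adj_H))
    (List.replicate adj_H.length (-1), List.replicate V.toNat (-1))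


-- ===== PRECONDITION & SPEC =====
def Spec_max_matching_convex (adj_H : List (List Int)) (V : Int) (out : List Int × List Int) : Prop := out = max_matching_convex_alt adj_H V
instance (adj_H : List (List Int)) (V : Int) (out : List Int × List Int) : Decidable (Spec_max_matching_convex adj_H V out) := by unfold Spec_max_matching_convex; infer_instance

-- ===== CLAIM (what is proved, stated in full; the proofs are below) =====
def Claim_equal_max_matching_convex : Prop := ∀ (adj_H : List (List Int)) (V : Int), Dom_max_matching_convex adj_H V → Spec_max_matching_convex adj_H V (max_matching_convex adj_H V)

-- ===== LEMMAS AND PROOFS =====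

/- Proof-side abbreviations -/
def pvKey (t : Int × Int × Int) : Int × Int := (t.2.2, t.1)
def pvFree (mH : List Int) (t : Int × Int × Int) : Bool := PySem.List.pyGetD mH t.1 0 == -1
def pvLe (a b : Int × Int) : Prop := a.1 < b.1 ∨ (a.1 = b.1 ∧ a.2 ≤ b.2)

/- order facts -/
theorem pvTupLt_eq_pvLexLt : pvTupLt = pvLexLt := rfl

theorem pvLexLt_eq_false_iff (a b : Int × Int) : pvLexLt a b = false ↔ pvLe b a := by
  simp [pvLexLt, pvLe]; omega

theorem pvLe_refl (a : Int × Int) : pvLe a a := Or.inr ⟨rfl, le_refl _⟩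

theorem pvLe_antisymm {a b : Int × Int} (h1 : pvLe a b) (h2 : pvLe b a) : a = b := by
  rcases a with ⟨a1, a2⟩; rcases b with ⟨b1, b2⟩
  simp [pvLe] at h1 h2
  have : a1 = b1 ∧ a2 = b2 := by omega
  simp [this.1, this.2]

theorem pvLe_trans {a b c : Int × Int} (h1 : pvLe a b) (h2 : pvLe b c) : pvLe a c := by
  simp [pvLe] at *; omega

/- interval-construction equality -/
theorem pvPyGetD_neg_one (xs : List Int) (h : xs ≠ []) (d : Int) :
    PySem.List.pyGetD xs (-1) d = xs.getLast h := by
  have hl : 0 < xs.length := List.length_pos_iff.mpr h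
  simp only [PySem.List.pyGetD, PySem.List.pyGet?, PySem.List.pyIdx?]
  rw [if_neg (by omega), if_pos (by exact_mod_cast by omega)]
  have he : xs.length - (-(-1:Int)).toNat = xs.length - 1 := by norm_num
  rw [he, Option.bind]
  rw [List.getLast_eq_getElem, List.getElem?_eq_getElem (by omega)]
  rfl

theorem pvLe_getLast : ∀ (xs : List Int), xs.Pairwise (· ≤ ·) → ∀ (h : xs ≠ []),
    ∀ y ∈ xs, y ≤ xs.getLast h := by
  intro xs
  induction xs with
  | nil => simp
  | cons a t ih =>
    intro hp h y hy
    cases t with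
    | nil => simp at hy; simp [hy]
    | cons b t' =>
      rw [List.getLast_cons (by simp)]
      rcases List.mem_cons.mp hy with rfl | hy'
      · exact le_trans ((List.pairwise_cons.mp hp).1 _ (List.getLast_mem (by simp))) le_rfl
      · exact ih (List.pairwise_cons.mp hp).2 (by simp) y hy'

theorem sorted_set_head_last (nbrs : List Int) (hne : nbrs ≠ []) :
    PySem.List.pyGetD (PySem.List.sorted (PySem.Set.ofList nbrs) (fun x => x)) 0 0
      = (PySem.List.min? nbrs (fun x => x)).getD 0 ∧
    PySem.List.pyGetD (PySem.List.sorted (PySem.Set.ofList nbrs) (fun x => x)) (-1) 0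
      = (PySem.List.max? nbrs (fun x => x)).getD 0 := by
  set u := PySem.List.sorted (PySem.Set.ofList nbrs) (fun x => x) with hu
  obtain ⟨n0, t0, rfl⟩ : ∃ a t, nbrs = a :: t := by
    cases nbrs with
    | nil => exact absurd rfl hne
    | cons a t => exact ⟨a, t, rfl⟩
  have hmemu : ∀ y : Int, y ∈ u ↔ y ∈ n0 :: t0 := fun y => by
    rw [hu, PySem.List.mem_sorted, PySem.Set.mem_ofList]
  have hune : u ≠ [] := by
    intro h0
    have := (hmemu n0).mpr (by simp)
    simp [h0] at this
  obtain ⟨u0, ut, hu0⟩ := List.exists_cons_of_ne_nil hune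
  constructor
  · -- head = min
    have hmin : ∀ y ∈ n0 :: t0, u0 ≤ y := by
      intro y hy
      exact PySem.List.key_head_sorted_le _ _ (hu ▸ hu0) y ((PySem.Set.mem_ofList _ _).mpr hy)
    cases hmq : PySem.List.min? (n0 :: t0) (fun x => x) with
    | none => exact absurd ((PySem.List.min?_eq_none_iff _ _).mp hmq) (by simp)
    | some m =>
      have hm1 : m ∈ n0 :: t0 := PySem.List.min?_mem hmq
      have hm2 := PySem.List.min?_isMin hmq
      have he : u0 = m :=
        le_antisymm (hmin m hm1) (hm2 u0 ((hmemu u0).mp (by simp [hu0])))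
      rw [PySem.List.pyGetD_of_nonneg _ _ (by norm_num)]
      simp [hu0, he]
  · -- last = max
    have hpw : u.Pairwise (· ≤ ·) := hu ▸ PySem.List.sorted_pairwise _ _
    have hmax : ∀ y ∈ n0 :: t0, y ≤ u.getLast hune := by
      intro y hy
      exact pvLe_getLast u hpw hune y ((hmemu y).mpr hy)
    cases hmq : PySem.List.max? (n0 :: t0) (fun x => x) with
    | none => exact absurd ((PySem.List.max?_eq_none_iff _ _).mp hmq) (by simp)
    | some m =>
      have hm1 : m ∈ n0 :: t0 := PySem.List.max?_mem hmq
      have hm2 := PySem.List.max?_isMax hmq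
      have he : u.getLast hune = m :=
        le_antisymm (hm2 _ ((hmemu _).mp (List.getLast_mem hune))) (hmax m hm1)
      rw [pvPyGetD_neg_one u hune, he]
      rfl

theorem intervalsA_eq_map_filter (adj_H : List (List Int)) :
    pvIntervalsA adj_H = ((PySem.List.enumerate adj_H 0).filter (fun p => !decide (p.2 = []))).map
      (fun p => (p.1, PySem.List.pyGetD (PySem.List.sorted (PySem.Set.ofList p.2) (fun x => x)) 0 0,
                 PySem.List.pyGetD (PySem.List.sorted (PySem.Set.ofList p.2) (fun x => x)) (-1) 0)) := by
  unfold pvIntervalsA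
  rw [show (fun (acc : List (Int × Int × Int)) (p : Int × List Int) =>
      if p.2 = [] then acc
      else
        let uniq := PySem.List.sorted (PySem.Set.ofList p.2) (fun x => x)
        acc ++ [(p.1, PySem.List.pyGetD uniq 0 0, PySem.List.pyGetD uniq (-1) 0)])
    = (fun acc p =>
      if (!decide (p.2 = [])) = true then
        acc ++ [(p.1, PySem.List.pyGetD (PySem.List.sorted (PySem.Set.ofList p.2) (fun x => x)) 0 0,
                 PySem.List.pyGetD (PySem.List.sorted (PySem.Set.ofList p.2) (fun x => x)) (-1) 0)]
      else acc) from by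
      funext acc p
      by_cases h : p.2 = [] <;> simp [h]]
  rw [PySem.List.foldl_append_if]
  simp

theorem intervalsB_eq (adj_H : List (List Int)) : pvIntervalsB adj_H = pvIntervalsA adj_H := by
  unfold pvIntervalsB
  rw [show (fun (acc : List (Int × Int × Int)) (p : Int × List Int) =>
      if p.2 = [] then acc
      else acc ++ [(p.1, (PySem.List.min? p.2 (fun x => x)).getD 0,
                    (PySem.List.max? p.2 (fun x => x)).getD 0)])
    = (fun acc p =>
      if (!decide (p.2 = [])) = true then
        acc ++ [(p.1, (PySem.List.min? p.2 (fun x => x)).getD 0,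
                 (PySem.List.max? p.2 (fun x => x)).getD 0)]
      else acc) from by
      funext acc p
      by_cases h : p.2 = [] <;> simp [h]]
  rw [PySem.List.foldl_append_if, intervalsA_eq_map_filter]
  simp only [List.nil_append]
  apply List.map_congr_left
  intro p hp
  have hne : p.2 ≠ [] := by
    have := List.of_mem_filter hp
    simpa using this
  obtain ⟨h1, h2⟩ := sorted_set_head_last p.2 hne
  simp [h1, h2]

/- static facts about the interval list -/
theorem intervalsA_fst_sublist (adj_H : List (List Int)) :
    ((pvIntervalsA adj_H).map (fun t => t.1)).Sublist
      (PySem.List.pyRange 0 (adj_H.length : Int)) := by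
  rw [intervalsA_eq_map_filter, List.map_map]
  have hc : ((fun t : Int × Int × Int => t.1) ∘
      (fun p : Int × List Int =>
        (p.1, PySem.List.pyGetD (PySem.List.sorted (PySem.Set.ofList p.2) (fun x => x)) 0 0,
         PySem.List.pyGetD (PySem.List.sorted (PySem.Set.ofList p.2) (fun x => x)) (-1) 0)))
      = (fun p : Int × List Int => p.1) := rfl
  rw [hc]
  have hsub : (((PySem.List.enumerate adj_H 0).filter (fun p => !decide (p.2 = []))).map
      (fun p : Int × List Int => p.1)).Sublist ((PySem.List.enumerate adj_H 0).map (fun p => p.1)) :=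
    List.Sublist.map _ List.filter_sublist
  rw [PySem.List.map_fst_enumerate] at hsub
  simpa using hsub

theorem intervalsA_fst_nodup (adj_H : List (List Int)) :
    ((pvIntervalsA adj_H).map (fun t => t.1)).Nodup :=
  (PySem.List.nodup_pyRange_one _ _).sublist (intervalsA_fst_sublist adj_H)

theorem intervalsA_fst_range (adj_H : List (List Int)) :
    ∀ t ∈ pvIntervalsA adj_H, 0 ≤ t.1 ∧ t.1 < (adj_H.length : Int) := by
  intro t ht
  have : t.1 ∈ (pvIntervalsA adj_H).map (fun t => t.1) := List.mem_map_of_mem ht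
  have := (intervalsA_fst_sublist adj_H).mem this
  exact PySem.List.mem_pyRange_one.mp this

/- pq (sorted-list heap model) lemmas -/
theorem insertBy_perm (x : Int × Int) (pq : List (Int × Int)) :
    (PySem.List.insertBy pvLexLt x pq).Perm (x :: pq) := by
  induction pq with
  | nil => simp [PySem.List.insertBy]
  | cons y ys ih =>
    simp only [PySem.List.insertBy]
    split
    · exact List.Perm.refl _
    · exact ((ih.cons y).trans (List.Perm.swap x y ys)).symm.symm

theorem mem_insertBy_lexLt (x y : Int × Int) (pq : List (Int × Int)) :
    y ∈ PySem.List.insertBy pvLexLt x pq ↔ y = x ∨ y ∈ pq :=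
  PySem.List.mem_insertBy pvLexLt x y pq

theorem insertBy_pairwise (x : Int × Int) (pq : List (Int × Int)) (h : pq.Pairwise pvLe) :
    (PySem.List.insertBy pvLexLt x pq).Pairwise pvLe := by
  induction pq with
  | nil => simp [PySem.List.insertBy, List.pairwise_cons]
  | cons y ys ih =>
    rw [List.pairwise_cons] at h
    simp only [PySem.List.insertBy]
    split
    · rename_i hlt
      rw [List.pairwise_cons]
      refine ⟨?_, List.pairwise_cons.mpr h⟩
      intro z hz
      have hxy : pvLe x y := by
        cases h0 : pvLexLt y x with
        | false => exact (pvLexLt_eq_false_iff y x).mp h0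
        | true => exfalso; simp [pvLexLt] at hlt h0; omega
      rcases List.mem_cons.mp hz with rfl | hz'
      · exact hxy
      · exact pvLe_trans hxy (h.1 z hz')
    · rename_i hge
      rw [List.pairwise_cons]
      refine ⟨?_, ih h.2⟩
      intro z hz
      rcases (mem_insertBy_lexLt x z ys).mp hz with rfl | hz'
      · exact (pvLexLt_eq_false_iff z y).mp (by simpa using hge)
      · exact h.1 z hz'

theorem purge_eq_filter (v : Int) (pq : List (Int × Int)) (h : pq.Pairwise pvLe) :
    pvPurge v pq = pq.filter (fun k => decide (v ≤ k.1)) := by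
  induction pq with
  | nil => rfl
  | cons k rest ih =>
    rw [List.pairwise_cons] at h
    simp only [pvPurge]
    split
    · rename_i hlt
      rw [ih h.2, List.filter_cons_of_neg (by simpa using by omega)]
    · rename_i hge
      rw [List.filter_cons_of_pos (by simpa using by omega)]
      congr 1
      exact (List.filter_eq_self.mpr (fun a ha => by
        have := h.1 a ha
        simp [pvLe] at this ⊢
        omega)).symm

theorem purge_pairwise (v : Int) (pq : List (Int × Int)) (h : pq.Pairwise pvLe) :
    (pvPurge v pq).Pairwise pvLe := by
  rw [purge_eq_filter v pq h]; exact List.Pairwise.sublist List.filter_sublist h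

/- pushLoop characterisation -/
theorem pushLoop_spec (v : Int) : ∀ (rem : List (Int × Int × Int)) (pq : List (Int × Int)),
    rem.Pairwise (fun a b => a.2.1 ≤ b.2.1) →
    ∃ cons, rem = cons ++ (pvPushLoop v rem pq).1
      ∧ (∀ t ∈ cons, t.2.1 ≤ v)
      ∧ (∀ t ∈ (pvPushLoop v rem pq).1, v < t.2.1)
      ∧ ((pvPushLoop v rem pq).2).Perm
          (pq ++ (cons.filter (fun t => decide (v ≤ t.2.2))).map pvKey)
      ∧ (pq.Pairwise pvLe → ((pvPushLoop v rem pq).2).Pairwise pvLe) := by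
  intro rem
  induction rem with
  | nil =>
    intro pq _
    exact ⟨[], by simp [pvPushLoop], by simp, by simp [pvPushLoop], by simp [pvPushLoop], fun h => h⟩
  | cons t rest ih =>
    intro pq hp
    rw [List.pairwise_cons] at hp
    by_cases htle : t.2.1 ≤ v
    · have hrw : pvPushLoop v (t :: rest) pq
          = pvPushLoop v rest (if t.2.2 ≥ v then PySem.List.insertBy pvLexLt (t.2.2, t.1) pq else pq) := by
        simp only [pvPushLoop, if_pos htle]
      obtain ⟨cons', he, hc, hr, hperm, hpw⟩ :=
        ih (if t.2.2 ≥ v then PySem.List.insertBy pvLexLt (t.2.2, t.1) pq else pq) hp.2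
      refine ⟨t :: cons', ?_, ?_, ?_, ?_, ?_⟩
      · rw [hrw]; simpa using he
      · intro x hx
        rcases List.mem_cons.mp hx with rfl | hx'
        · exact htle
        · exact hc x hx'
      · rw [hrw]; exact hr
      · rw [hrw]
        by_cases hR : t.2.2 ≥ v
        · rw [if_pos hR] at hperm
          rw [show (if t.2.2 ≥ v then PySem.List.insertBy pvLexLt (t.2.2, t.1) pq else pq) = PySem.List.insertBy pvLexLt (t.2.2, t.1) pq from if_pos hR]
          have h1 : (PySem.List.insertBy pvLexLt (t.2.2, t.1) pq
              ++ (cons'.filter (fun t => decide (v ≤ t.2.2))).map pvKey).Perm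
              (((t.2.2, t.1) :: pq) ++ (cons'.filter (fun t => decide (v ≤ t.2.2))).map pvKey) :=
            (insertBy_perm _ pq).append_right _
          have h2 : ((t :: cons').filter (fun t => decide (v ≤ t.2.2))).map pvKey
              = (t.2.2, t.1) :: (cons'.filter (fun t => decide (v ≤ t.2.2))).map pvKey := by
            rw [List.filter_cons_of_pos (by simpa using hR)]
            rfl
          rw [h2]
          exact (hperm.trans h1).trans List.perm_middle.symm
        · rw [if_neg hR] at hperm
          rw [show (if t.2.2 ≥ v then PySem.List.insertBy pvLexLt (t.2.2, t.1) pq else pq) = pq from if_neg hR]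
          have h2 : ((t :: cons').filter (fun t => decide (v ≤ t.2.2)))
              = cons'.filter (fun t => decide (v ≤ t.2.2)) := by
            rw [List.filter_cons_of_neg (by simpa using hR)]
          rw [h2]
          exact hperm
      · intro hpq
        rw [hrw]
        apply hpw
        by_cases hR : t.2.2 ≥ v
        · rw [if_pos hR]; exact insertBy_pairwise _ _ hpq
        · rw [if_neg hR]; exact hpq
    · have hrw : pvPushLoop v (t :: rest) pq = (t :: rest, pq) := by
        simp only [pvPushLoop, if_neg htle]
      refine ⟨[], by simp [hrw], by simp, ?_, by simp [hrw], by simp [hrw]⟩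
      rw [hrw]
      intro x hx
      rcases List.mem_cons.mp hx with rfl | hx'
      · omega
      · have := hp.1 x hx'
        omega

/- pvBest as a fold over the candidate keys -/
def pvMStep (b : Option (Int × Int)) (k : Int × Int) : Option (Int × Int) :=
  match b with
  | none => some k
  | some b0 => if pvTupLt k b0 then some k else some b0

theorem pvBest_fold (I : List (Int × Int × Int)) (mH : List Int) (v : Int) :
    ∀ acc, I.foldl (fun best t =>
      if PySem.List.pyGetD mH t.1 0 == -1 && decide (t.2.1 ≤ v) && decide (v ≤ t.2.2) then
        match best with
        | none => some (t.2.2, t.1)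
        | some b => if pvTupLt (t.2.2, t.1) b then some (t.2.2, t.1) else some b
      else best) acc
    = ((I.filter (fun t => pvFree mH t && decide (t.2.1 ≤ v) && decide (v ≤ t.2.2))).map pvKey).foldl pvMStep acc := by
  induction I with
  | nil => intro acc; rfl
  | cons t rest ih =>
    intro acc
    rw [List.foldl_cons, List.filter_cons]
    by_cases hc : (PySem.List.pyGetD mH t.1 0 == -1 && decide (t.2.1 ≤ v) && decide (v ≤ t.2.2)) = true
    · rw [if_pos hc, if_pos (show (pvFree mH t && decide (t.2.1 ≤ v) && decide (v ≤ t.2.2)) = true from hc), List.map_cons, List.foldl_cons, ih]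
      rfl
    · rw [if_neg hc, if_neg (show ¬ (pvFree mH t && decide (t.2.1 ≤ v) && decide (v ≤ t.2.2)) = true from hc), ih]

theorem pvMFold_none_iff : ∀ (ks : List (Int × Int)), ks.foldl pvMStep none = none ↔ ks = [] := by
  intro ks
  cases ks with
  | nil => simp
  | cons k rest =>
    simp only [List.foldl_cons, pvMStep]
    constructor
    · intro h
      exfalso
      -- a foldl of pvMStep from a `some` accumulator is never none
      have : ∀ (l : List (Int × Int)) (b : Int × Int), l.foldl pvMStep (some b) ≠ none := by
        intro l
        induction l with
        | nil => simp
        | cons x xs ih2 =>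
          intro b
          simp only [List.foldl_cons, pvMStep]
          split <;> apply ih2
      exact this rest k h
    · intro h; simp at h
  
theorem pvMFold_spec : ∀ (ks : List (Int × Int)) (acc : Option (Int × Int)) (m : Int × Int),
    ks.foldl pvMStep acc = some m →
    (acc = some m ∨ m ∈ ks) ∧ (∀ y ∈ ks, pvLe m y) ∧ (∀ a, acc = some a → pvLe m a) := by
  intro ks
  induction ks with
  | nil =>
    intro acc m h
    simp at h
    exact ⟨Or.inl (by rw [h]), by simp, fun a ha => by rw [h] at ha; cases ha; exact pvLe_refl m⟩
  | cons k rest ih =>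
    intro acc m h
    rw [List.foldl_cons] at h
    obtain ⟨hmem, hmin, hacc⟩ := ih (pvMStep acc k) m h
    have hmk : pvLe m k := by
      cases acc with
      | none => exact hacc k rfl
      | some b =>
        simp only [pvMStep] at hmem hacc
        by_cases hlt : pvTupLt k b = true
        · rw [if_pos hlt] at hacc; exact hacc k rfl
        · rw [if_neg hlt] at hacc
          have hbk : pvLe b k := (pvLexLt_eq_false_iff k b).mp (by simpa using hlt)
          exact pvLe_trans (hacc b rfl) hbk
    refine ⟨?_, ?_, ?_⟩
    · rcases hmem with h0 | h0
      · cases acc with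
        | none =>
          simp only [pvMStep] at h0
          cases h0; exact Or.inr (by simp)
        | some b =>
          simp only [pvMStep] at h0
          by_cases hlt : pvTupLt k b = true
          · rw [if_pos hlt] at h0; cases h0; exact Or.inr (by simp)
          · rw [if_neg hlt] at h0; exact Or.inl h0
      · exact Or.inr (List.mem_cons_of_mem _ h0)
    · intro y hy
      rcases List.mem_cons.mp hy with rfl | hy'
      · exact hmk
      · exact hmin y hy'
    · intro a ha
      cases acc with
      | none => cases ha
      | some b =>
        cases ha
        simp only [pvMStep] at hacc
        by_cases hlt : pvTupLt k a = true
        · rw [if_pos hlt] at hacc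
          have hka : pvLe k a := by
            have := (pvLexLt_eq_false_iff a k).mp
            simp [pvTupLt_eq_pvLexLt, pvLexLt] at hlt
            simp [pvLe]
            omega
          exact pvLe_trans hmk hka
        · rw [if_neg hlt] at hacc; exact hacc a rfl

/- pvBest characterisation: it is the head of any pvLe-sorted permutation of the candidate keys -/
theorem pvBest_eq_head (I : List (Int × Int × Int)) (mH : List Int) (v : Int)
    (pq : List (Int × Int)) (hs : pq.Pairwise pvLe)
    (hp : pq.Perm (((I.filter (fun t => pvFree mH t && decide (t.2.1 ≤ v) && decide (v ≤ t.2.2)))).map pvKey)) :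
    pvBest I mH v = pq.head? := by
  have hfold := pvBest_fold I mH v none
  cases pq with
  | nil =>
    have : (I.filter (fun t => pvFree mH t && decide (t.2.1 ≤ v) && decide (v ≤ t.2.2))).map pvKey = [] :=
      hp.symm.eq_nil
    unfold pvBest
    rw [hfold, this]
    rfl
  | cons k rest =>
    unfold pvBest
    rw [hfold]
    rw [List.pairwise_cons] at hs
    cases hm : (((I.filter (fun t => pvFree mH t && decide (t.2.1 ≤ v) && decide (v ≤ t.2.2))).map pvKey)).foldl pvMStep none with
    | none =>
      exfalso
      have := (pvMFold_none_iff _).mp hm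
      rw [this] at hp
      exact absurd hp.eq_nil (by simp)
    | some m =>
      obtain ⟨hmem, hmin, -⟩ := pvMFold_spec _ none m hm
      have hmk : pvLe m k := hmin k (hp.mem_iff.mp (by simp))
      have hkm : pvLe k m := by
        rcases hmem with h0 | h0
        · exact absurd h0 (by simp)
        · have : m ∈ k :: rest := hp.mem_iff.mpr h0
          rcases List.mem_cons.mp this with rfl | h1
          · exact pvLe_refl m
          · exact hs.1 m h1
      rw [pvLe_antisymm hmk hkm]
      rfl

/- the simulation invariant -/
def pvInv (S : List (Int × Int × Int)) (H Vn : Nat) (n : Nat)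
    (stA : List (Int × Int × Int) × List (Int × Int) × List Int × List Int)
    (stB : List Int × List Int) : Prop :=
  stB.1 = stA.2.2.1 ∧ stB.2 = stA.2.2.2 ∧
  stA.2.2.1.length = H ∧ stA.2.2.2.length = Vn ∧
  (∀ k : Nat, n ≤ k → k < Vn → stA.2.2.2.getD k 0 = -1) ∧
  ∃ pre, S = pre ++ stA.1
    ∧ (∀ t ∈ pre, t.2.1 ≤ (n : Int) - 1)
    ∧ (n = 0 → pre = [])
    ∧ (∀ t ∈ stA.1, n ≠ 0 → (n : Int) - 1 < t.2.1)
    ∧ (∀ t ∈ stA.1, pvFree stA.2.2.1 t = true)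
    ∧ stA.2.1.Pairwise pvLe
    ∧ stA.2.1.Perm ((pre.filter (fun t => pvFree stA.2.2.1 t && decide ((n : Int) - 1 ≤ t.2.2))).map pvKey)

theorem pvStep_inv (adj_H : List (List Int)) (Vn n : Nat) (hn : n < Vn)
    (stA : List (Int × Int × Int) × List (Int × Int) × List Int × List Int)
    (stB : List Int × List Int)
    (hInv : pvInv (PySem.List.sorted (pvIntervalsA adj_H) (fun t => t.2.1)) adj_H.length Vn n stA stB) :
    pvInv (PySem.List.sorted (pvIntervalsA adj_H) (fun t => t.2.1)) adj_H.length Vn (n + 1)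
      (pvStepA stA (n : Int)) (pvStepB (pvIntervalsA adj_H) stB (n : Int)) := by
  obtain ⟨rem, pq, mH, mV⟩ := stA
  obtain ⟨mB1, mB2⟩ := stB
  obtain ⟨hB1, hB2, hLH, hLV, hmV, pre, hS, hpre, hpre0, hremL, hfree, hpw, hperm⟩ := hInv
  simp only at hB1 hB2 hLH hLV hmV hS hpre hpre0 hremL hfree hpw hperm
  -- static facts
  set S := PySem.List.sorted (pvIntervalsA adj_H) (fun t => t.2.1) with hSdef
  have hSperm : S.Perm (pvIntervalsA adj_H) := PySem.List.sorted_perm _ _ _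
  have hSpw : S.Pairwise (fun a b => a.2.1 ≤ b.2.1) := PySem.List.sorted_pairwise _ _
  have hSnodup : (S.map (fun t => t.1)).Nodup :=
    ((hSperm.map (fun t => t.1)).nodup_iff).mpr (intervalsA_fst_nodup adj_H)
  have hSrange : ∀ t ∈ S, 0 ≤ t.1 ∧ t.1 < (adj_H.length : Int) := fun t ht =>
    intervalsA_fst_range adj_H t ((PySem.List.mem_sorted _ _ _ _).mp ht)
  -- push loop
  have hremPW : rem.Pairwise (fun a b => a.2.1 ≤ b.2.1) :=
    (List.pairwise_append.mp (hS ▸ hSpw)).2.1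
  obtain ⟨cons, hce, hcle, hrgt, hpperm, hppw⟩ := pushLoop_spec (n : Int) rem pq hremPW
  set rem₁ := (pvPushLoop (n : Int) rem pq).1 with hrem₁
  set pq₁ := (pvPushLoop (n : Int) rem pq).2 with hpq₁
  have hpq₁pw : pq₁.Pairwise pvLe := hppw hpw
  set pq₂ := pvPurge (n : Int) pq₁ with hpq₂
  have hpq₂f : pq₂ = pq₁.filter (fun k => decide ((n : Int) ≤ k.1)) := purge_eq_filter _ _ hpq₁pw
  have hpq₂pw : pq₂.Pairwise pvLe := purge_pairwise _ _ hpq₁pw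
  set pre' := pre ++ cons with hpre'
  have hS' : S = pre' ++ rem₁ := by rw [hpre', hS, hce, List.append_assoc]
  have hpre'L : ∀ t ∈ pre', t.2.1 ≤ (n : Int) := by
    intro t ht
    rcases List.mem_append.mp ht with h0 | h0
    · have := hpre t h0; omega
    · exact hcle t h0
  have hconsFree : ∀ t ∈ cons, pvFree mH t = true := fun t ht =>
    hfree t (hce ▸ List.mem_append_left _ ht)
  -- the key permutation: pq₂ ↔ candidates in pre'
  have hKey : pq₂.Perm ((pre'.filter (fun t => pvFree mH t && decide ((n : Int) ≤ t.2.2))).map pvKey) := by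
    rw [hpq₂f]
    refine (hpperm.filter _).trans ?_
    rw [List.filter_append]
    have eK : ((cons.filter (fun t => decide ((n : Int) ≤ t.2.2))).map pvKey).filter
          (fun k => decide ((n : Int) ≤ k.1))
        = (cons.filter (fun t => pvFree mH t && decide ((n : Int) ≤ t.2.2))).map pvKey := by
      rw [List.filter_map]
      congr 1
      rw [show ((fun k : Int × Int => decide ((n : Int) ≤ k.1)) ∘ pvKey)
          = (fun t : Int × Int × Int => decide ((n : Int) ≤ t.2.2)) from rfl]
      rw [List.filter_filter]
      apply List.filter_congr
      intro t ht
      simp [hconsFree t ht]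
    have e2 : ((pq.filter (fun k => decide ((n : Int) ≤ k.1)))).Perm
        ((pre.filter (fun t => pvFree mH t && decide ((n : Int) ≤ t.2.2))).map pvKey) := by
      refine (hperm.filter _).trans ?_
      rw [List.filter_map]
      rw [show ((fun k : Int × Int => decide ((n : Int) ≤ k.1)) ∘ pvKey)
          = (fun t : Int × Int × Int => decide ((n : Int) ≤ t.2.2)) from rfl]
      rw [List.filter_filter]
      rw [List.filter_congr (q := fun t => pvFree mH t && decide ((n : Int) ≤ t.2.2)) ?_]
      intro t ht
      by_cases h1 : (n : Int) ≤ t.2.2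
      · simp [h1, show ((n : Int) - 1 ≤ t.2.2) from by omega]
      · simp [h1]
    rw [eK]
    refine (e2.append_right _).trans ?_
    rw [← List.map_append, ← List.filter_append]
  -- candidates scanned by B equal pq₂ as a multiset
  have hKs : pq₂.Perm ((((pvIntervalsA adj_H).filter
      (fun t => pvFree mH t && decide (t.2.1 ≤ (n : Int)) && decide ((n : Int) ≤ t.2.2)))).map pvKey) := by
    refine hKey.trans (List.Perm.map _ ?_)
    have h1 : (S.filter (fun t => pvFree mH t && decide (t.2.1 ≤ (n : Int)) && decide ((n : Int) ≤ t.2.2))).Perm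
        ((pvIntervalsA adj_H).filter (fun t => pvFree mH t && decide (t.2.1 ≤ (n : Int)) && decide ((n : Int) ≤ t.2.2))) :=
      hSperm.filter _
    have h2 : S.filter (fun t => pvFree mH t && decide (t.2.1 ≤ (n : Int)) && decide ((n : Int) ≤ t.2.2))
        = pre'.filter (fun t => pvFree mH t && decide ((n : Int) ≤ t.2.2)) := by
      rw [hS', List.filter_append]
      have hnil : rem₁.filter (fun t => pvFree mH t && decide (t.2.1 ≤ (n : Int)) && decide ((n : Int) ≤ t.2.2)) = [] := by
        apply List.filter_eq_nil_iff.mpr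
        intro t ht
        have := hrgt t ht
        simp only [Bool.and_eq_true, decide_eq_true_eq, not_and]
        intro h0 h1
        omega
      rw [hnil, List.append_nil]
      apply List.filter_congr
      intro t ht
      simp [hpre'L t ht]
    rw [← h2]
    exact h1
  have hbest : pvBest (pvIntervalsA adj_H) mH (n : Int) = pq₂.head? :=
    pvBest_eq_head _ _ _ pq₂ hpq₂pw hKs
  have hcast : ((n + 1 : Nat) : Int) - 1 = (n : Int) := by push_cast; ring
  -- reduce both steps
  show pvInv S adj_H.length Vn (n + 1)
    (pvStepA (rem, pq, mH, mV) (n : Int)) (pvStepB (pvIntervalsA adj_H) (mB1, mB2) (n : Int))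
  rw [hB1, hB2]
  have hstepA : pvStepA (rem, pq, mH, mV) (n : Int)
      = match pq₂ with
        | [] => (rem₁, [], mH, mV)
        | k :: rest =>
          if PySem.List.pyGetD mH k.2 0 == -1 && PySem.List.pyGetD mV (n : Int) 0 == -1 then
            (rem₁, rest, PySem.List.pySetD mH k.2 (n : Int), PySem.List.pySetD mV (n : Int) k.2)
          else (rem₁, rest, mH, mV) := rfl
  have hstepB : pvStepB (pvIntervalsA adj_H) (mH, mV) (n : Int)
      = match pq₂.head? with
        | none => (mH, mV)
        | some b => (PySem.List.pySetD mH b.2 (n : Int), PySem.List.pySetD mV (n : Int) b.2) := by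
    unfold pvStepB
    rw [hbest]
  cases hC : pq₂ with
  | nil =>
    simp only [hstepA, hstepB, hC]
    refine ⟨rfl, rfl, hLH, hLV, ?_, pre', hS', ?_, by omega, ?_, ?_, List.Pairwise.nil, ?_⟩
    · intro k hk hk'; exact hmV k (by omega) hk'
    · intro t ht; rw [hcast]; exact hpre'L t ht
    · intro t ht _; rw [hcast]; exact hrgt t ht
    · intro t ht; exact hfree t (hce ▸ List.mem_append_right _ ht)
    · rw [hcast]
      exact hC ▸ hKey
  | cons k rest =>
    -- the popped minimum corresponds to a unique interval t₀ ∈ pre'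
    have hx : (k :: rest).Perm ((pre'.filter (fun t => pvFree mH t && decide ((n : Int) ≤ t.2.2))).map pvKey) :=
      hC ▸ hKey
    have hkX : k ∈ (pre'.filter (fun t => pvFree mH t && decide ((n : Int) ≤ t.2.2))).map pvKey :=
      hx.mem_iff.mp (by simp)
    obtain ⟨t₀, ht₀f, hkeyt₀⟩ := List.mem_map.mp hkX
    have ht₀pre : t₀ ∈ pre' := List.mem_of_mem_filter ht₀f
    have ht₀free : pvFree mH t₀ = true := by
      have h := List.of_mem_filter ht₀f
      simp only [Bool.and_eq_true] at h
      exact h.1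
    have ht₀S : t₀ ∈ S := hS' ▸ List.mem_append_left _ ht₀pre
    obtain ⟨ht₀0, ht₀H⟩ := hSrange t₀ ht₀S
    -- the mate checks both pass
    have hg1 : (PySem.List.pyGetD mH k.2 0 == -1) = true := by
      rw [← hkeyt₀]; exact ht₀free
    have hg2 : (PySem.List.pyGetD mV ((n : Nat) : Int) 0 == -1) = true := by
      rw [PySem.List.pyGetD_natCast, hmV n le_rfl hn]; rfl
    have hguard : (PySem.List.pyGetD mH k.2 0 == -1 && PySem.List.pyGetD mV ((n : Nat) : Int) 0 == -1) = true := by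
      rw [hg1, hg2]; rfl
    simp only [hstepA, hstepB, hC, List.head?_cons]
    rw [if_pos hguard]
    unfold pvInv
    dsimp only
    -- nodup machinery
    have hSnodup' : (pre'.map (fun t => t.1) ++ rem₁.map (fun t => t.1)).Nodup := by
      rw [← List.map_append, ← hS']; exact hSnodup
    have hnd := List.nodup_append.mp hSnodup'
    have hpre'nodupf : (pre'.map (fun t => t.1)).Nodup := hnd.1
    have hdisj : ∀ a ∈ pre'.map (fun t => t.1), ∀ b ∈ rem₁.map (fun t => t.1), a ≠ b := hnd.2.2
    have hInj : ∀ x ∈ pre', ∀ y ∈ pre', x.1 = y.1 → x = y := by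
      intro x hx' y hy' hxy
      exact List.inj_on_of_nodup_map hpre'nodupf hx' hy' hxy

    have hk2 : k.2 = t₀.1 := by rw [← hkeyt₀]; rfl
    refine ⟨rfl, rfl, by rw [PySem.List.length_pySetD]; exact hLH,
      by rw [PySem.List.length_pySetD]; exact hLV, ?_, pre', hS', ?_, by omega, ?_, ?_, ?_, ?_⟩
    · -- untouched verticals stay free
      intro j hj hj'
      rw [PySem.List.pySetD_of_nonneg _ _ (by omega), Int.toNat_natCast]
      rw [List.getD_eq_getElem?_getD, List.getElem?_set_ne (by omega), ← List.getD_eq_getElem?_getD]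
      exact hmV j (by omega) hj'
    · intro t ht; rw [hcast]; exact hpre'L t ht
    · intro t ht _; rw [hcast]; exact hrgt t ht
    · -- remaining intervals still unmatched
      intro t ht
      have h0t : 0 ≤ t.1 := (hSrange t (hS' ▸ List.mem_append_right _ ht)).1
      have hne : t₀.1 ≠ t.1 :=
        hdisj t₀.1 (List.mem_map_of_mem ht₀pre) t.1 (List.mem_map_of_mem ht)
      show (PySem.List.pyGetD (PySem.List.pySetD mH k.2 ((n : Nat) : Int)) t.1 0 == -1) = true
      rw [hk2, PySem.List.pySetD_of_nonneg _ _ ht₀0]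
      rw [PySem.List.pyGetD_of_nonneg _ _ h0t]
      rw [List.getD_eq_getElem?_getD, List.getElem?_set_ne (by omega), ← List.getD_eq_getElem?_getD]
      rw [← PySem.List.pyGetD_of_nonneg _ _ h0t]
      exact hfree t (hce ▸ List.mem_append_right _ ht)
    · exact (List.pairwise_cons.mp (hC ▸ hpq₂pw)).2
    · -- the heap after popping matches the updated candidate set
      rw [hcast]
      set F := pre'.filter (fun t => pvFree mH t && decide ((n : Int) ≤ t.2.2)) with hFdef
      have hFnodup : F.Nodup :=
        ((hpre'nodupf.of_map).filter _)
      obtain ⟨F1, F2, hF⟩ := List.append_of_mem ht₀f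
      have hFnd2 := List.nodup_append.mp (hF ▸ hFnodup)
      have ht₀nF1 : t₀ ∉ F1 := fun hmem => (hFnd2.2.2 t₀ hmem t₀ (by simp)) rfl
      have ht₀nF2 : t₀ ∉ F2 := (List.nodup_cons.mp hFnd2.2.1).1
      have hmemF : ∀ x ∈ F, x ∈ pre' := fun x hx' => List.mem_of_mem_filter (hFdef ▸ hx')
      have e1 : pre'.filter (fun t => pvFree (PySem.List.pySetD mH k.2 ((n : Nat) : Int)) t && decide ((n : Int) ≤ t.2.2))
          = F.filter (fun t => !(t.1 == t₀.1)) := by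
        rw [hFdef, List.filter_filter]
        apply List.filter_congr
        intro t ht
        by_cases ht1 : t.1 = t₀.1
        · have : t = t₀ := hInj t ht t₀ ht₀pre ht1
          subst this
          have hself : pvFree (PySem.List.pySetD mH k.2 ((n : Nat) : Int)) t = false := by
            simp only [pvFree]
            rw [hk2, PySem.List.pySetD_of_nonneg _ _ ht₀0]
            rw [PySem.List.pyGetD_of_nonneg _ _ ht₀0]
            rw [List.getD_eq_getElem?_getD, List.getElem?_set_self (by omega)]
            simp
          simp [hself]
        · have hsame : pvFree (PySem.List.pySetD mH k.2 ((n : Nat) : Int)) t = pvFree mH t := by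
            have h0t : 0 ≤ t.1 := (hSrange t (hS' ▸ List.mem_append_left _ ht)).1
            simp only [pvFree]
            rw [hk2, PySem.List.pySetD_of_nonneg _ _ ht₀0]
            rw [PySem.List.pyGetD_of_nonneg _ _ h0t, PySem.List.pyGetD_of_nonneg _ _ h0t]
            rw [List.getD_eq_getElem?_getD, List.getElem?_set_ne (by omega), ← List.getD_eq_getElem?_getD]
          simp [hsame, ht1]
      have e2 : F.filter (fun t => !(t.1 == t₀.1)) = F1 ++ F2 := by
        rw [hF, List.filter_append, List.filter_cons]
        rw [if_neg (by simp)]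
        rw [List.filter_eq_self.mpr, List.filter_eq_self.mpr]
        · intro x hx'
          have hxF : x ∈ F := hF ▸ List.mem_append_right _ (List.mem_cons_of_mem _ hx')
          simp only [Bool.not_eq_eq_eq_not, Bool.not_true, beq_eq_false_iff_ne, ne_eq]
          intro he
          exact ht₀nF2 ((hInj x (hmemF x hxF) t₀ ht₀pre he) ▸ hx')
        · intro x hx'
          have hxF : x ∈ F := hF ▸ List.mem_append_left _ hx'
          simp only [Bool.not_eq_eq_eq_not, Bool.not_true, beq_eq_false_iff_ne, ne_eq]
          intro he
          exact ht₀nF1 ((hInj x (hmemF x hxF) t₀ ht₀pre he) ▸ hx')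
      rw [e1, e2, List.map_append]
      have e3 : F.map pvKey = F1.map pvKey ++ k :: F2.map pvKey := by
        rw [hF, List.map_append, List.map_cons, hkeyt₀]
      have hx2 : (k :: rest).Perm (k :: (F1.map pvKey ++ F2.map pvKey)) := by
        refine (hFdef ▸ hx).trans ?_
        rw [e3]
        exact List.perm_middle
      exact hx2.cons_inv

theorem pvInv_init (adj_H : List (List Int)) (Vn : Nat) :
    pvInv (PySem.List.sorted (pvIntervalsA adj_H) (fun t => t.2.1)) adj_H.length Vn 0
      (PySem.List.sorted (pvIntervalsA adj_H) (fun t => t.2.1), [],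
        List.replicate adj_H.length (-1), List.replicate Vn (-1))
      (List.replicate adj_H.length (-1), List.replicate Vn (-1)) := by
  refine ⟨rfl, rfl, by simp, by simp, ?_, [], rfl, by simp, fun _ => rfl, ?_, ?_, List.Pairwise.nil, by simp⟩
  · intro k _ hk
    exact List.getD_replicate _ hk
  · intro t _ h; exact absurd rfl h
  · intro t ht
    have ht' : t ∈ pvIntervalsA adj_H := (PySem.List.mem_sorted _ _ _ _).mp ht
    obtain ⟨h0, h1⟩ := intervalsA_fst_range adj_H t ht'
    simp only [pvFree]
    rw [PySem.List.pyGetD_of_nonneg _ _ h0]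
    rw [List.getD_eq_getElem?_getD, List.getElem?_replicate]
    rw [if_pos (by omega)]
    rfl

theorem pvInv_main (adj_H : List (List Int)) (Vn : Nat) : ∀ n, n ≤ Vn →
    pvInv (PySem.List.sorted (pvIntervalsA adj_H) (fun t => t.2.1)) adj_H.length Vn n
      ((PySem.List.pyRange 0 (n : Int) 1).foldl pvStepA
        (PySem.List.sorted (pvIntervalsA adj_H) (fun t => t.2.1), [],
          List.replicate adj_H.length (-1), List.replicate Vn (-1)))
      ((PySem.List.pyRange 0 (n : Int) 1).foldl (pvStepB (pvIntervalsA adj_H))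
        (List.replicate adj_H.length (-1), List.replicate Vn (-1))) := by
  intro n
  induction n with
  | zero =>
    intro _
    rw [PySem.List.pyRange_one_eq_nil (by norm_num)]
    exact pvInv_init adj_H Vn
  | succ n ih =>
    intro h
    have hc : ((n + 1 : Nat) : Int) = (n : Int) + 1 := by push_cast; ring
    rw [hc, PySem.List.pyRange_one_succ_right (by positivity), List.foldl_append, List.foldl_append]
    simp only [List.foldl_cons, List.foldl_nil]
    exact pvStep_inv adj_H Vn n (by omega) _ _ (ih (by omega))

-- ===== VERDICT (by name: the statement is the Claim_ definition above) =====
theorem max_matching_convex_spec : Claim_equal_max_matching_convex := by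
  intro adj_H V _
  unfold Spec_max_matching_convex max_matching_convex max_matching_convex_alt
  rw [intervalsB_eq]
  have hr : PySem.List.pyRange 0 V 1 = PySem.List.pyRange 0 (V.toNat : Int) 1 := by
    rcases le_or_gt V 0 with h | h
    · rw [PySem.List.pyRange_one_eq_nil h, PySem.List.pyRange_one_eq_nil (by simp [Int.toNat_of_nonpos h])]
    · rw [Int.toNat_of_nonneg (le_of_lt h)]
  rw [hr]
  have h := pvInv_main adj_H V.toNat V.toNat (le_refl _)
  obtain ⟨h1, h2, -⟩ := h
  rw [Prod.ext_iff]
  exact ⟨h1.symm, h2.symm⟩
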